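-- pv_equiv track=rewrite | github.com/alexanderremmerie/main_street | src/main_street/solve.py | _longest_run_bits
-- ===== SOURCE A (Python) =====
-- def _longest_run_bits(bits: int, n: int) -> tuple[int, int]:
--     """Length and rightmost-end index of the longest run of set bits in
--     `bits`, scanning positions 0..n-1. Ties resolve to the rightmost run
--     (matching the game's tie-break)."""
--     best_len = 0
--     best_end = -1
--     cur = 0
--     for i in range(n):
--         if (bits >> i) & 1:
--             cur += 1
--             if cur >= best_len:
--                 best_len, best_end = cur, i
--         else:
--             cur = 0
--     return best_len, best_end
-- ===== SOURCE B (Python) =====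
-- def _longest_run_bits(bits: int, n: int) -> tuple[int, int]:
--     """Collect every maximal run of set bits as (length, end_index), then
--     select the lexicographic maximum (longest; rightmost end on ties)."""
--     runs = []
--     cur = 0
--     for i in range(n):
--         if (bits >> i) & 1:
--             cur += 1
--         else:
--             if cur:
--                 runs.append((cur, i - 1))
--             cur = 0
--     if cur:
--         runs.append((cur, n - 1))
--     best = (0, -1)
--     for r in runs:
--         if r > best:
--             best = r
--     return best
-- ===== Notes on version B (the rewrite author's own statement) =====
-- stated objective: alternative
-- what changed: Replaces the fused scan-and-update (best updated inside the scan with a >= tie-break) by a collect-then-select decomposition: one pass builds the list of all maximal runs as (length, end) pairs, then a separate lexicographic-max selection over that list picks the longest, rightmost run.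
import Mathlib
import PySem

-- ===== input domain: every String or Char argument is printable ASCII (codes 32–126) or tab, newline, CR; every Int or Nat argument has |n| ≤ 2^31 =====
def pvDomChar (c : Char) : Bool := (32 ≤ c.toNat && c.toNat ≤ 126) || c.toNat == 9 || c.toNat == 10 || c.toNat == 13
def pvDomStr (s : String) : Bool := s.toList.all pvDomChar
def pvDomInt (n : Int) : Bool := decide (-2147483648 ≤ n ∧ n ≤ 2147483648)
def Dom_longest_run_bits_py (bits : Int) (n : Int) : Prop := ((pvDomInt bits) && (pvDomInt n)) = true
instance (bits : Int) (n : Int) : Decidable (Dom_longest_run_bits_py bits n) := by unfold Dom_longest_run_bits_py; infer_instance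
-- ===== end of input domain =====

-- B replaces A's fused scan-and-update by a collect-all-runs pass followed by a
-- separate lexicographic-max selection (alternative decomposition, same cost).

-- (bits >> i) & 1, shared bit test of both Pythons (i is a range index, so 0 ≤ i)
def pvBit (bits : Int) (i : Int) : Int := PySem.Int.band (bits >>> i.toNat) 1

-- ===== PORT A =====
def longest_run_bits_py (bits : Int) (n : Int) : Int × Int :=
  -- state (best_len, best_end, cur)
  let s := (PySem.List.pyRange 0 n 1).foldl
    (fun (st : Int × Int × Int) i =>
      if pvBit bits i ≠ 0 then
        if st.2.2 + 1 ≥ st.1 then (st.2.2 + 1, i, st.2.2 + 1)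
        else (st.1, st.2.1, st.2.2 + 1)
      else (st.1, st.2.1, 0))
    (0, -1, 0)
  (s.1, s.2.1)

-- ===== PORT B =====
-- 'r > best' on Python tuples: lexicographic comparison
def pvPick (b : Int × Int) (r : Int × Int) : Int × Int :=
  if r.1 > b.1 ∨ (r.1 = b.1 ∧ r.2 > b.2) then r else b

def longest_run_bits_py_alt (bits : Int) (n : Int) : Int × Int :=
  -- state (runs, cur)
  let s := (PySem.List.pyRange 0 n 1).foldl
    (fun (st : List (Int × Int) × Int) i =>
      if pvBit bits i ≠ 0 then (st.1, st.2 + 1)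
      else if st.2 ≠ 0 then (st.1 ++ [(st.2, i - 1)], 0)
      else (st.1, 0))
    ([], 0)
  let runs := if s.2 ≠ 0 then s.1 ++ [(s.2, n - 1)] else s.1
  runs.foldl pvPick (0, -1)

-- ===== PRECONDITION & SPEC =====
def Spec_longest_run_bits_py (bits : Int) (n : Int) (out : Int × Int) : Prop := out = longest_run_bits_py_alt bits n
instance (bits : Int) (n : Int) (out : Int × Int) : Decidable (Spec_longest_run_bits_py bits n out) := by unfold Spec_longest_run_bits_py; infer_instance

-- ===== CLAIM (what is proved, stated in full; the proofs are below) =====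
def Claim_equal_longest_run_bits_py : Prop := ∀ (bits : Int) (n : Int), Dom_longest_run_bits_py bits n → Spec_longest_run_bits_py bits n (longest_run_bits_py bits n)

-- ===== LEMMAS AND PROOFS =====

-- A's fold over the first m indices
def pvAfold (bits : Int) (m : Nat) : Int × Int × Int :=
  ((List.range m).map (Nat.cast : Nat → Int)).foldl
    (fun (st : Int × Int × Int) i =>
      if pvBit bits i ≠ 0 then
        if st.2.2 + 1 ≥ st.1 then (st.2.2 + 1, i, st.2.2 + 1)
        else (st.1, st.2.1, st.2.2 + 1)
      else (st.1, st.2.1, 0))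
    (0, -1, 0)

-- B's fold over the first m indices
def pvBfold (bits : Int) (m : Nat) : List (Int × Int) × Int :=
  ((List.range m).map (Nat.cast : Nat → Int)).foldl
    (fun (st : List (Int × Int) × Int) i =>
      if pvBit bits i ≠ 0 then (st.1, st.2 + 1)
      else if st.2 ≠ 0 then (st.1 ++ [(st.2, i - 1)], 0)
      else (st.1, 0))
    ([], 0)

-- B's selection loop
def pvSel (runs : List (Int × Int)) : Int × Int := runs.foldl pvPick (0, -1)

lemma pvAfold_succ (bits : Int) (m : Nat) :
    pvAfold bits (m + 1) =
      (fun (st : Int × Int × Int) (i : Int) =>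
        if pvBit bits i ≠ 0 then
          if st.2.2 + 1 ≥ st.1 then (st.2.2 + 1, i, st.2.2 + 1)
          else (st.1, st.2.1, st.2.2 + 1)
        else (st.1, st.2.1, 0)) (pvAfold bits m) (m : Int) := by
  simp [pvAfold, List.range_succ]

lemma pvBfold_succ (bits : Int) (m : Nat) :
    pvBfold bits (m + 1) =
      (fun (st : List (Int × Int) × Int) (i : Int) =>
        if pvBit bits i ≠ 0 then (st.1, st.2 + 1)
        else if st.2 ≠ 0 then (st.1 ++ [(st.2, i - 1)], 0)
        else (st.1, 0)) (pvBfold bits m) (m : Int) := by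
  simp [pvBfold, List.range_succ]

lemma pvSel_append_single (xs : List (Int × Int)) (y : Int × Int) :
    pvSel (xs ++ [y]) = pvPick (pvSel xs) y := by
  simp [pvSel, List.foldl_append]

lemma pvSel_cases (xs : List (Int × Int)) : pvSel xs = (0, -1) ∨ pvSel xs ∈ xs := by
  have h : ∀ (b : Int × Int), xs.foldl pvPick b = b ∨ xs.foldl pvPick b ∈ xs := by
    induction xs with
    | nil => intro b; left; rfl
    | cons x t ih =>
      intro b
      rcases ih (pvPick b x) with h | h
      · rw [List.foldl_cons, h]
        unfold pvPick
        split
        · right; exact List.mem_cons_self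
        · left; rfl
      · right; exact List.mem_cons_of_mem _ h
  exact h (0, -1)

-- the invariant relating A's state to B's state after m steps
lemma pv_inv (bits : Int) (m : Nat) :
    (pvAfold bits m).2.2 = (pvBfold bits m).2 ∧
    0 ≤ (pvBfold bits m).2 ∧ (pvBfold bits m).2 ≤ (m : Int) ∧
    (pvAfold bits m).2.1 < (m : Int) ∧
    (∀ r ∈ (pvBfold bits m).1, 0 < r.1 ∧ r.2 + (pvBfold bits m).2 < (m : Int)) ∧
    ((pvAfold bits m).1, (pvAfold bits m).2.1)
      = pvSel (if (pvBfold bits m).2 ≠ 0 then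
                 (pvBfold bits m).1 ++ [((pvBfold bits m).2, (m : Int) - 1)]
               else (pvBfold bits m).1) := by
  induction m with
  | zero =>
    refine ⟨rfl, le_refl _, le_refl _, by norm_num [pvAfold], ?_, ?_⟩
    · intro r hr; simp [pvBfold] at hr
    · simp [pvAfold, pvBfold, pvSel]
  | succ m ih =>
    rcases hA : pvAfold bits m with ⟨bl, be, c⟩
    rcases hB : pvBfold bits m with ⟨runs, cB⟩
    rw [hA, hB] at ih
    obtain ⟨hc, hc0, hcm, hbe, hruns, hsel⟩ := ih
    dsimp only at hc hc0 hcm hbe hruns hsel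
    subst hc
    rw [pvAfold_succ, pvBfold_succ, hA, hB]
    have hsr : pvSel runs = (0, -1) ∨ pvSel runs ∈ runs := pvSel_cases runs
    have hl : ((pvSel runs).1 = 0 ∧ (pvSel runs).2 = -1) ∨
        (0 < (pvSel runs).1 ∧ (pvSel runs).2 + c < (m : Int)) := by
      rcases hsr with h | h
      · left; rw [h]; exact ⟨rfl, rfl⟩
      · right; exact hruns _ h
    by_cases hbit : pvBit bits (m : Int) ≠ 0
    · -- set bit: cur increases; A maybe updates best; B's runs unchanged
      simp only [if_pos hbit]
      have hc1 : c + 1 ≠ 0 := by omega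
      simp only [if_pos hc1]
      have hnew : pvSel (runs ++ [(c + 1, ((m : Int) + 1) - 1)])
          = pvPick (pvSel runs) (c + 1, ((m : Int) + 1) - 1) := pvSel_append_single _ _
      by_cases hcz : c = 0
      · -- previous run was empty: old best = pvSel runs
        subst hcz
        simp only [zero_add] at hnew
        have hold : (bl, be) = pvSel runs := by
          rw [if_neg (by simp)] at hsel; exact hsel
        have hbl0 : bl = (pvSel runs).1 := by rw [← hold]
        have hbe0 : be = (pvSel runs).2 := by rw [← hold]
        refine ⟨?_, by omega, by (try dsimp only); push_cast; omega, ?_, ?_, ?_⟩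
        · split_ifs <;> rfl
        · split_ifs <;> push_cast <;> omega
        · exact fun r hr => by have := hruns r hr; push_cast; omega
        · push_cast
          rw [hnew, pvPick]
          by_cases hwin : (1 : Int) ≥ bl
          · rw [if_pos hwin, if_pos (by dsimp only; rcases hl with ⟨h1, h2⟩ | ⟨h1, h2⟩ <;> omega)]
            norm_num
          · rw [if_neg hwin, if_neg (by dsimp only; omega), ← hold]
      · -- ongoing run: old best = pvPick (pvSel runs) (c, m-1)
        have hold : (bl, be) = pvPick (pvSel runs) (c, (m : Int) - 1) := by
          rw [if_pos hcz] at hsel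
          rw [hsel, pvSel_append_single]
        have holdres : (c ≥ (pvSel runs).1 → bl = c ∧ be = (m : Int) - 1) ∧
            (c < (pvSel runs).1 → bl = (pvSel runs).1 ∧ be = (pvSel runs).2) := by
          constructor
          · intro hge
            rw [pvPick, if_pos ?_] at hold
            · exact ⟨congrArg Prod.fst hold, congrArg Prod.snd hold⟩
            · dsimp only; rcases hl with ⟨h1, h2⟩ | ⟨h1, h2⟩ <;> omega
          · intro hlt
            rw [pvPick, if_neg (by dsimp only; omega)] at hold
            exact ⟨congrArg Prod.fst hold, congrArg Prod.snd hold⟩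
        refine ⟨?_, by omega, by (try dsimp only); push_cast; omega, ?_, ?_, ?_⟩
        · split_ifs <;> rfl
        · have : bl ≤ c ∨ (bl = (pvSel runs).1 ∧ be = (pvSel runs).2) := by
            by_cases hge : c ≥ (pvSel runs).1
            · left; exact (holdres.1 hge).1.le
            · right; exact holdres.2 (by omega)
          split_ifs <;> push_cast <;> rcases this with h | ⟨h1, h2⟩ <;>
            rcases hl with ⟨a1, a2⟩ | ⟨a1, a2⟩ <;> omega
        · exact fun r hr => by have := hruns r hr; push_cast; omega
        · push_cast
          rw [hnew, pvPick]
          by_cases hge : c ≥ (pvSel runs).1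
          · obtain ⟨hblc, _⟩ := holdres.1 hge
            rw [if_pos (by omega), if_pos (by dsimp only; rcases hl with ⟨a1, a2⟩ | ⟨a1, a2⟩ <;> push_cast <;> omega)]
            norm_num
          · obtain ⟨hbll, hbee⟩ := holdres.2 (by omega)
            by_cases hwin : c + 1 ≥ bl
            · rw [if_pos hwin, if_pos (by dsimp only; rcases hl with ⟨a1, a2⟩ | ⟨a1, a2⟩ <;> push_cast <;> omega)]
              norm_num
            · rw [if_neg hwin, if_neg (by (try dsimp only); push_cast; omega)]
              rw [hbll, hbee]
    · -- clear bit: A resets cur; B closes the ongoing run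
      simp only [if_neg hbit]
      by_cases hcz : c = 0
      · subst hcz
        simp only [if_neg (by simp : ¬ ((0:Int) ≠ 0))]
        refine ⟨by first | rfl | trivial, by first | exact le_refl _ | trivial, by (try dsimp only); push_cast; omega, by (try dsimp only); push_cast; omega,
          fun r hr => by have := hruns r hr; push_cast; omega, ?_⟩
        rw [if_neg (by simp)] at hsel
        exact hsel
      · simp only [if_pos hcz, if_neg (by simp : ¬ ((0:Int) ≠ 0))]
        refine ⟨by first | rfl | trivial, by first | exact le_refl _ | trivial, by (try dsimp only); push_cast; omega, by (try dsimp only); push_cast; omega, ?_, ?_⟩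
        · intro r hr
          rcases List.mem_append.mp hr with h | h
          · have := hruns r h; push_cast; omega
          · simp only [List.mem_singleton] at h; subst h
            exact ⟨by dsimp only; omega, by (try dsimp only); push_cast; omega⟩
        · rw [if_pos hcz] at hsel
          exact hsel

-- express the ports through the fold abbreviations
lemma portA_eq (bits n : Int) :
    longest_run_bits_py bits n = ((pvAfold bits n.toNat).1, (pvAfold bits n.toNat).2.1) := by
  simp [longest_run_bits_py, pvAfold, PySem.List.pyRange_one]

lemma portB_eq (bits n : Int) :
    longest_run_bits_py_alt bits n =
      pvSel (if (pvBfold bits n.toNat).2 ≠ 0 then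
               (pvBfold bits n.toNat).1 ++ [((pvBfold bits n.toNat).2, n - 1)]
             else (pvBfold bits n.toNat).1) := by
  simp [longest_run_bits_py_alt, pvBfold, pvSel, PySem.List.pyRange_one]

-- ===== VERDICT (by name: the statement is the Claim_ definition above) =====
theorem longest_run_bits_py_spec : Claim_equal_longest_run_bits_py := by
  intro bits n _
  unfold Spec_longest_run_bits_py
  obtain ⟨hc, hc0, hcm, _, _, hsel⟩ := pv_inv bits n.toNat
  rw [portA_eq, portB_eq]
  by_cases hn : 0 < n
  · have hcast : ((n.toNat : Int)) = n := Int.toNat_of_nonneg (le_of_lt hn)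
    rw [← hcast]
    exact hsel
  · -- empty range: cur = 0, so the final index n-1 is never used
    have h0 : n.toNat = 0 := by omega
    rw [h0] at hsel hc hc0 hcm ⊢
    have hcz : (pvBfold bits 0).2 = 0 := by omega
    rw [if_neg (by simp [hcz])]
    rw [if_neg (by simp [hcz])] at hsel
    exact hsel
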